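-- pv_equiv track=rewrite | github.com/camel-ai/camel | camel/toolkits/hybrid_browser_toolkit/browser_debug.py | _extract_docstring_description
-- ===== SOURCE A (Python) =====
-- def _extract_docstring_description(docstring: str) -> str:
--     """Extract the first line or paragraph from a docstring."""
--     if not docstring:
--         return ""
--
--     # Clean up the docstring
--     lines = docstring.strip().split('\n')
--     description_lines = []
--
--     for line in lines:
--         line = line.strip()
--         if line and not line.startswith(
--             ('Args:', 'Returns:', 'Raises:', 'Note:', 'Example:')
--         ):
--             description_lines.append(line)
--         elif line.startswith(('Args:', 'Returns:')):
--             break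
--
--     return ' '.join(description_lines).strip()
-- ===== SOURCE B (Python) =====
-- def _extract_docstring_description(docstring: str) -> str:
--     if not docstring:
--         return ""
--     stripped = [line.strip() for line in docstring.strip().split('\n')]
--     cut = next(
--         (i for i, line in enumerate(stripped)
--          if line.startswith(('Args:', 'Returns:'))),
--         len(stripped),
--     )
--     kept = [
--         line
--         for line in stripped[:cut]
--         if line and not line.startswith(('Raises:', 'Note:', 'Example:'))
--     ]
--     return ' '.join(kept).strip()
-- ===== Notes on version B (the rewrite author's own statement) =====
-- stated objective: alternative
-- what changed: Replaces A's single loop with an append-accumulator and a break by three shaped passes: strip all lines, locate the first Args:/Returns: line to slice the prefix, then filter out blank and Raises:/Note:/Example: lines.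
import Mathlib
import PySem

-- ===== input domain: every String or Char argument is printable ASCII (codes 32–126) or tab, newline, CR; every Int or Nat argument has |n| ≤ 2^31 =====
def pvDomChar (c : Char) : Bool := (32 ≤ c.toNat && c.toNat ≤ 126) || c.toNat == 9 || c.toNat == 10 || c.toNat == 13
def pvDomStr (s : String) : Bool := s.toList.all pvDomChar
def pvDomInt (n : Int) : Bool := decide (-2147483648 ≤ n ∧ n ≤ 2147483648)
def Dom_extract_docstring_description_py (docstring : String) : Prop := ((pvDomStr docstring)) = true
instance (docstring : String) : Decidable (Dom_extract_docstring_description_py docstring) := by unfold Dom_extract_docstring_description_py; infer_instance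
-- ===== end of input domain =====

-- B re-decomposes A's single break-loop into three passes (strip all lines, slice at the first
-- Args:/Returns: line, filter out blank/Raises:/Note:/Example: lines); same cost, same values.

-- s.startswith((p1, …, pn)) for a tuple of prefixes (used by both ports)
def pvStartsAny (s : String) (ps : List String) : Bool := ps.any (PySem.Str.startswith s)

-- s.split('\n'): the separator is the literal nonempty "\n", so Str.split? is always `some`
def pvSplitNL (s : String) : List String := (PySem.Str.split? s "\n").getD []

-- ===== PORT A =====
-- A's for-loop with append and break, as structural recursion carrying description_lines
def pvALoop : List String → List String → List String
  | [], acc => acc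
  | l :: ls, acc =>
    let line := PySem.Str.strip l
    if line ≠ "" &&
        !pvStartsAny line ["Args:", "Returns:", "Raises:", "Note:", "Example:"] then
      pvALoop ls (acc ++ [line])
    else if pvStartsAny line ["Args:", "Returns:"] then
      acc
    else
      pvALoop ls acc

def extract_docstring_description_py (docstring : String) : String :=
  if docstring == "" then ""
  else
    let lines := pvSplitNL (PySem.Str.strip docstring)
    let description_lines := pvALoop lines []
    PySem.Str.strip (PySem.Str.join " " description_lines)

-- ===== PORT B =====
def extract_docstring_description_py_alt (docstring : String) : String :=
  if docstring == "" then ""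
  else
    let stripped := (pvSplitNL (PySem.Str.strip docstring)).map PySem.Str.strip
    let cut := (stripped.findIdx? (fun line => pvStartsAny line ["Args:", "Returns:"])).getD stripped.length
    let kept := (stripped.take cut).filter
      (fun line => line ≠ "" && !pvStartsAny line ["Raises:", "Note:", "Example:"])
    PySem.Str.strip (PySem.Str.join " " kept)

-- ===== PRECONDITION & SPEC =====
def Spec_extract_docstring_description_py (docstring : String) (out : String) : Prop := out = extract_docstring_description_py_alt docstring
instance (docstring : String) (out : String) : Decidable (Spec_extract_docstring_description_py docstring out) := by unfold Spec_extract_docstring_description_py; infer_instance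

-- ===== CLAIM (what is proved, stated in full; the proofs are below) =====
def Claim_equal_extract_docstring_description_py : Prop := ∀ (docstring : String), Dom_extract_docstring_description_py docstring → Spec_extract_docstring_description_py docstring (extract_docstring_description_py docstring)

-- ===== LEMMAS AND PROOFS =====

-- startswith on the 5-tuple splits into the break pair and the skip triple
theorem pvStartsAny_five (s : String) :
    pvStartsAny s ["Args:", "Returns:", "Raises:", "Note:", "Example:"] =
      (pvStartsAny s ["Args:", "Returns:"] ||
        pvStartsAny s ["Raises:", "Note:", "Example:"]) := by
  simp only [pvStartsAny, List.any_cons, List.any_nil, Bool.or_false, Bool.or_assoc]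

-- A's loop produces exactly B's take-then-filter of the stripped lines
theorem pvALoop_eq (ls acc : List String) :
    pvALoop ls acc =
      acc ++ ((ls.map PySem.Str.strip).take
          (((ls.map PySem.Str.strip).findIdx?
              (fun line => pvStartsAny line ["Args:", "Returns:"])).getD
            (ls.map PySem.Str.strip).length)).filter
        (fun line => line ≠ "" && !pvStartsAny line ["Raises:", "Note:", "Example:"]) := by
  induction ls generalizing acc with
  | nil => simp only [pvALoop, List.map_nil, List.take_nil, List.filter_nil, List.append_nil]
  | cons l ls ih =>
    simp only [pvALoop, pvStartsAny_five, List.map_cons, List.findIdx?_cons, List.length_cons]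
    cases hb2 : pvStartsAny (PySem.Str.strip l) ["Args:", "Returns:"] with
    | true =>
      simp only [Bool.true_or, Bool.not_true, Bool.and_false, Bool.false_eq_true,
        if_false, if_true, List.take_zero, List.filter_nil, List.append_nil, Option.getD_some]
    | false =>
      have hgd : ((Option.map (· + 1)
            ((ls.map PySem.Str.strip).findIdx?
              (fun line => pvStartsAny line ["Args:", "Returns:"]))).getD
            ((ls.map PySem.Str.strip).length + 1)) =
          (((ls.map PySem.Str.strip).findIdx?
              (fun line => pvStartsAny line ["Args:", "Returns:"])).getD
            (ls.map PySem.Str.strip).length) + 1 := by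
        cases (ls.map PySem.Str.strip).findIdx?
            (fun line => pvStartsAny line ["Args:", "Returns:"]) <;> simp
      simp only [Bool.false_or, Bool.false_eq_true, if_false, hgd,
        List.take_succ_cons, List.filter_cons]
      cases hq : (decide (¬PySem.Str.strip l = "") &&
          !pvStartsAny (PySem.Str.strip l) ["Raises:", "Note:", "Example:"]) with
      | true =>
        simp only [if_true, ih, List.append_assoc, List.singleton_append]
      | false =>
        simp only [Bool.false_eq_true, if_false, ih]

-- ===== VERDICT (by name: the statement is the Claim_ definition above) =====
theorem extract_docstring_description_py_spec : Claim_equal_extract_docstring_description_py := by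
  intro docstring _
  unfold Spec_extract_docstring_description_py
  unfold extract_docstring_description_py extract_docstring_description_py_alt
  by_cases h : docstring == ""
  · simp only [h, if_true]
  · simp only [h, Bool.false_eq_true, if_false]
    rw [pvALoop_eq, List.nil_append]
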